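-- pv_equiv track=rewrite | github.com/Carehealth1/radilogycall | utils.py | format_subspecialty_coverage
-- ===== SOURCE A (Python) =====
-- def format_subspecialty_coverage(radiologists):
--     """Format subspecialty coverage matrix"""
--     coverage = {}
--     for rad in radiologists:
--         subspecialty = rad['subspecialty']
--         if subspecialty not in coverage:
--             coverage[subspecialty] = []
--         coverage[subspecialty].append(rad['name'])
--
--     return coverage
-- ===== SOURCE B (Python) =====
-- def format_subspecialty_coverage(radiologists):
--     """Format subspecialty coverage matrix"""
--     order = list(dict.fromkeys(rad['subspecialty'] for rad in radiologists))
--     return {s: [rad['name'] for rad in radiologists if rad['subspecialty'] == s]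
--             for s in order}
-- ===== Notes on version B (the rewrite author's own statement) =====
-- stated objective: alternative
-- what changed: Replaced the single hash-bucketing pass that appends into a dict of lists with a two-phase shape: ordered dedup of the subspecialty keys, then one filtering comprehension per subspecialty building its name list.
import Mathlib
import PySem

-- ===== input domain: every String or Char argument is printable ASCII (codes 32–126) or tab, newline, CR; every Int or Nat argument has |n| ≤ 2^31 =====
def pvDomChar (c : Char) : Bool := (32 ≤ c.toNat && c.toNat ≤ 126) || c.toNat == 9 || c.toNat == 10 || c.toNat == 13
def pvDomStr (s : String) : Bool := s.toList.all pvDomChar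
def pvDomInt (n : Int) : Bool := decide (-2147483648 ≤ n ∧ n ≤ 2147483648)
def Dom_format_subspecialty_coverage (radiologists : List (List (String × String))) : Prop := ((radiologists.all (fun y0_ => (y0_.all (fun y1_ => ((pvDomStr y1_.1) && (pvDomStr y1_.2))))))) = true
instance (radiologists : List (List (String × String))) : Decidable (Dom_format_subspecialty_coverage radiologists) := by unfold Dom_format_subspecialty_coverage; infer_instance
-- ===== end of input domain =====

-- ===== PORT A =====
-- B restructures the grouping as dedup-of-keys + one filtering pass per key; return value proved equal to A's (alternative decomposition, no speed claim).
-- rad['k'] on an association-list dict: first match; KeyError (missing key) excluded by Pre_, "" is never read inside Pre_.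
def pvGetKey (rad : List (String × String)) (k : String) : String :=
  (List.lookup k rad).getD ""

def format_subspecialty_coverage (radiologists : List (List (String × String))) : List (String × List String) :=
  (radiologists.foldl
    (fun (coverage : PySem.Dict String (List String)) rad =>
      let subspecialty := pvGetKey rad "subspecialty"
      let coverage := if coverage.contains subspecialty then coverage else coverage.insert subspecialty []
      coverage.modify subspecialty [] (fun l => l ++ [pvGetKey rad "name"]))
    PySem.Dict.empty).items

-- ===== PORT B =====
def format_subspecialty_coverage_alt (radiologists : List (List (String × String))) : List (String × List String) :=
  (PySem.List.dedup (radiologists.map (fun rad => pvGetKey rad "subspecialty"))).map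
    (fun s => (s, (radiologists.filter (fun rad => pvGetKey rad "subspecialty" == s)).map
                    (fun rad => pvGetKey rad "name")))

-- ===== PRECONDITION & SPEC =====
-- Pre_: every radiologist dict has both keys; otherwise Python A (and B) raise KeyError.
def Pre_format_subspecialty_coverage (radiologists : List (List (String × String))) : Prop :=
  ∀ rad ∈ radiologists, (List.lookup "subspecialty" rad).isSome ∧ (List.lookup "name" rad).isSome
instance (radiologists : List (List (String × String))) : Decidable (Pre_format_subspecialty_coverage radiologists) := by unfold Pre_format_subspecialty_coverage; infer_instance

def pvWitness_format_subspecialty_coverage : (List (List (String × String))) :=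
  [[("subspecialty", "neuro"), ("name", "Dr. A")], [("subspecialty", "neuro"), ("name", "Dr. B")], [("subspecialty", "msk"), ("name", "Dr. C")]]

def Spec_format_subspecialty_coverage (radiologists : List (List (String × String))) (out : List (String × List String)) : Prop := out = format_subspecialty_coverage_alt radiologists
instance (radiologists : List (List (String × String))) (out : List (String × List String)) : Decidable (Spec_format_subspecialty_coverage radiologists out) := by unfold Spec_format_subspecialty_coverage; infer_instance

-- ===== CLAIM (what is proved, stated in full; the proofs are below) =====
def Claim_equal_format_subspecialty_coverage : Prop := ∀ (radiologists : List (List (String × String))), Dom_format_subspecialty_coverage radiologists → Pre_format_subspecialty_coverage radiologists → Spec_format_subspecialty_coverage radiologists (format_subspecialty_coverage radiologists)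

-- ===== LEMMAS AND PROOFS =====

-- A's loop body ("setdefault to [] then append") is the modify-with-default step.
theorem stepA_eq_modify (d : PySem.Dict String (List String)) (s n : String) :
    (let d' := if d.contains s then d else d.insert s []
     d'.modify s [] (fun l => l ++ [n])) =
    d.modify s [] (fun l => l ++ [n]) := by
  by_cases h : d.contains s = true
  · simp [h]
  · simp only [Bool.not_eq_true] at h
    simp [h, PySem.Dict.modify, PySem.Dict.getD_insert_self, PySem.Dict.insert_insert_self,
      PySem.Dict.getD_of_not_contains d [] h]

-- A equals B unconditionally (Pre_ only delimits where the PYTHONS return).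
theorem ports_agree (radiologists : List (List (String × String))) :
    format_subspecialty_coverage radiologists = format_subspecialty_coverage_alt radiologists := by
  unfold format_subspecialty_coverage format_subspecialty_coverage_alt
  have hstep : (fun (coverage : PySem.Dict String (List String)) (rad : List (String × String)) =>
      let subspecialty := pvGetKey rad "subspecialty"
      let coverage := if coverage.contains subspecialty then coverage else coverage.insert subspecialty []
      coverage.modify subspecialty [] (fun l => l ++ [pvGetKey rad "name"])) =
      (fun (d : PySem.Dict String (List String)) (rad : List (String × String)) =>
        d.modify (pvGetKey rad "subspecialty") [] (fun l => l ++ [pvGetKey rad "name"])) := by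
    funext d rad
    exact stepA_eq_modify d (pvGetKey rad "subspecialty") (pvGetKey rad "name")
  rw [hstep]
  have hpairs : (List.foldl
      (fun (d : PySem.Dict String (List String)) (rad : List (String × String)) =>
        d.modify (pvGetKey rad "subspecialty") [] (fun l => l ++ [pvGetKey rad "name"]))
      PySem.Dict.empty radiologists) =
      (List.foldl (fun (d : PySem.Dict String (List String)) p => d.modify p.1 [] (fun l => l ++ [p.2]))
        PySem.Dict.empty
        (radiologists.map (fun rad => (pvGetKey rad "subspecialty", pvGetKey rad "name")))) := by
    rw [List.foldl_map]
  rw [hpairs]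
  set pairs := radiologists.map (fun rad => (pvGetKey rad "subspecialty", pvGetKey rad "name")) with hp
  set D := List.foldl (fun (d : PySem.Dict String (List String)) p => d.modify p.1 [] (fun l => l ++ [p.2]))
      PySem.Dict.empty pairs with hD
  have hnodup : D.keys.Nodup := by
    rw [hD]
    exact PySem.Dict.nodup_keys_foldl_modify_key pairs Prod.fst []
      (fun _ p => (fun l => l ++ [p.2])) PySem.Dict.empty PySem.Dict.nodup_keys_empty
  have hkeys : D.keys = PySem.List.dedup (radiologists.map (fun rad => pvGetKey rad "subspecialty")) := by
    rw [hD, PySem.Dict.keys_foldl_modify_key pairs Prod.fst [] (fun _ p => (fun l => l ++ [p.2]))]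
    simp [hp, PySem.List.dedup_eq_ofList, PySem.Set.ofList_eq_foldl, PySem.Set.update,
      PySem.Dict.keys_empty, List.map_map, Function.comp_def]
  have hgetD : ∀ s, D.getD s [] =
      (radiologists.filter (fun rad => pvGetKey rad "subspecialty" == s)).map
        (fun rad => pvGetKey rad "name") := by
    intro s
    rw [hD, PySem.Dict.getD_foldl_modify_append pairs PySem.Dict.empty s]
    simp [hp, PySem.Dict.getD_empty, List.filter_map, List.map_map, Function.comp_def]
  rw [PySem.Dict.items_eq_map_keys D hnodup [], hkeys]
  exact List.map_congr_left (fun s _ => by rw [hgetD s])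

-- ===== VERDICT (by name: the statement is the Claim_ definition above) =====
theorem format_subspecialty_coverage_spec : Claim_equal_format_subspecialty_coverage := by
  intro rads _ _
  unfold Spec_format_subspecialty_coverage
  exact ports_agree rads
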